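-- pv_equiv track=rewrite | github.com/Mvgnu/Lasso | scripts/benchmark_pipeline_validation.py | parse_peptidase_accessions
-- ===== SOURCE A (Python) =====
-- from typing import Dict, Iterable, List, Optional, Tuple
--
-- def normalize_accession(value: str) -> str:
--     raw = str(value or "").strip()
--     if not raw or raw.lower() == "unknown":
--         return ""
--     raw = raw.split()[0].strip()
--     if "." in raw:
--         base, suffix = raw.rsplit(".", 1)
--         if suffix.isdigit():
--             raw = base
--     return raw
--
-- def parse_peptidase_accessions(records: Iterable[Tuple[str, str]]) -> Dict[str, List[str]]:
--     """Return mapping of peptidase accession -> list of sequence strings."""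
--     mapping: Dict[str, List[str]] = {}
--     for name, seq in records:
--         acc = ""
--         for part in name.split("|"):
--             if part.startswith("pep="):
--                 acc = normalize_accession(part.split("=", 1)[1])
--                 break
--         if not acc:
--             continue
--         mapping.setdefault(acc, []).append(seq)
--     return mapping
-- ===== SOURCE B (Python) =====
-- def normalize_accession(value: str) -> str:
--     raw = str(value or "").strip()
--     if not raw or raw.lower() == "unknown":
--         return ""
--     raw = raw.split()[0].strip()
--     if "." in raw:
--         base, suffix = raw.rsplit(".", 1)
--         if suffix.isdigit():
--             raw = base
--     return raw
--
-- def parse_peptidase_accessions(records):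
--     """Return mapping of peptidase accession -> list of sequence strings."""
--     def accession_of(name):
--         for part in name.split("|"):
--             if part.startswith("pep="):
--                 return normalize_accession(part.split("=", 1)[1])
--         return ""
--     pairs = [(accession_of(name), seq) for name, seq in records]
--     pairs = [(a, s) for a, s in pairs if a]
--     order = list(dict.fromkeys(a for a, _ in pairs))
--     return {a: [s for b, s in pairs if b == a] for a in order}
-- ===== Notes on version B (the rewrite author's own statement) =====
-- stated objective: alternative
-- what changed: Replaces A's single pass that incrementally grows a dict via setdefault(...).append with a pipeline: parse all records into (accession, seq) pairs, drop empty accessions, dedup the accessions in first-occurrence order, and build the mapping with one grouping comprehension per distinct accession.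
import Mathlib
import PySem

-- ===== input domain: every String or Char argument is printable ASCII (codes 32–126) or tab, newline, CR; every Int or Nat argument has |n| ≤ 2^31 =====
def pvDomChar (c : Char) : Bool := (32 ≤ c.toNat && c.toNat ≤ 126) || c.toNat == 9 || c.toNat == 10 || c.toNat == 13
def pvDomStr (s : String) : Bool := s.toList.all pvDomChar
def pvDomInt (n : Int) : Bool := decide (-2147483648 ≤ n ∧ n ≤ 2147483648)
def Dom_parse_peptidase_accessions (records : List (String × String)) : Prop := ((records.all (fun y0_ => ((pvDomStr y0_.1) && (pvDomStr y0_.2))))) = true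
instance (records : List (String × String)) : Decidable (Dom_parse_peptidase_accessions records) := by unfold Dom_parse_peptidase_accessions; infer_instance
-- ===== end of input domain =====

-- B replaces A's incremental setdefault-dict grouping by a map/filter/dedup pipeline that builds
-- the grouped mapping in one comprehension per distinct accession (objective: alternative decomposition).


-- ===== PORT A =====
-- shared helper (identical source in Source A and Source B): raw.rsplit(".", 1) — exact when "." occurs in cs
-- (the only call site is guarded by '"." in raw')
def pvRsplitDot1 (cs : List Char) : List Char × List Char :=
  let r := cs.reverse
  let suf := r.takeWhile (fun c => !(c == '.'))
  ((r.drop (suf.length + 1)).reverse, suf.reverse)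

-- shared helper (identical source in Source A and Source B): normalize_accession
def normalize_accession (value : String) : String :=
  let raw := PySem.Str.strip (if value == "" then "" else value)  -- str(value or "").strip()
  if raw == "" || PySem.Str.lower raw == "unknown" then ""
  else
    -- raw.split()[0].strip(); raw is nonempty and stripped here, so split₀ is nonempty and index 0 exists
    let raw := PySem.Str.strip (PySem.List.pyGetD (PySem.Str.split₀ raw) (0 : Int) "")
    if PySem.Str.isIn "." raw then
      let p := pvRsplitDot1 raw.toList
      if PySem.Chars.strIsdigit p.2 then String.ofList p.1 else raw
    else raw

-- A's inner 'for part in name.split("|") … break' loop (Source B's accession_of has the identical body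
-- as an early-return function; both ports transcribe it through this one recursion)
def pvPepAcc : List String → String
  | [] => ""
  | part :: rest =>
    if PySem.Str.startswith part "pep=" then
      -- part.split("=", 1)[1]; '=' occurs in part (it starts with "pep="), so index 1 exists
      normalize_accession (PySem.List.pyGetD ((PySem.Str.splitMax? part "=" 1).getD []) (1 : Int) "")
    else pvPepAcc rest

def parse_peptidase_accessions (records : List (String × String)) : List (String × List String) :=
  (records.foldl
    (fun (mapping : PySem.Dict String (List String)) r =>
      let acc := pvPepAcc ((PySem.Str.split? r.1 "|").getD [])
      if acc == "" then mapping
      else mapping.modify acc [] (fun l => l ++ [r.2]))  -- mapping.setdefault(acc, []).append(seq)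
    PySem.Dict.empty).items

-- ===== PORT B =====
def parse_peptidase_accessions_alt (records : List (String × String)) : List (String × List String) :=
  let pairs := records.map (fun r => (pvPepAcc ((PySem.Str.split? r.1 "|").getD []), r.2))
  let pairs := pairs.filter (fun p => !(p.1 == ""))
  let order := PySem.List.dedup (pairs.map Prod.fst)  -- list(dict.fromkeys(...))
  order.map (fun a => (a, (pairs.filter (fun p => p.1 == a)).map Prod.snd))

-- ===== PRECONDITION & SPEC =====
def Spec_parse_peptidase_accessions (records : List (String × String)) (out : List (String × List String)) : Prop := out = parse_peptidase_accessions_alt records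
instance (records : List (String × String)) (out : List (String × List String)) : Decidable (Spec_parse_peptidase_accessions records out) := by unfold Spec_parse_peptidase_accessions; infer_instance

-- ===== CLAIM (what is proved, stated in full; the proofs are below) =====
def Claim_equal_parse_peptidase_accessions : Prop := ∀ (records : List (String × String)), Dom_parse_peptidase_accessions records → Spec_parse_peptidase_accessions records (parse_peptidase_accessions records)

-- ===== LEMMAS AND PROOFS =====

-- A's fold over records equals the modify-fold over B's filtered (accession, seq) pair list
theorem pv_foldA_eq_foldPairs (records : List (String × String))
    (d : PySem.Dict String (List String)) :
    records.foldl
      (fun (mapping : PySem.Dict String (List String)) r =>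
        let acc := pvPepAcc ((PySem.Str.split? r.1 "|").getD [])
        if acc == "" then mapping
        else mapping.modify acc [] (fun l => l ++ [r.2])) d
    = ((records.map (fun r => (pvPepAcc ((PySem.Str.split? r.1 "|").getD []), r.2))).filter
        (fun p => !(p.1 == ""))).foldl
        (fun (mapping : PySem.Dict String (List String)) p =>
          mapping.modify p.1 [] (fun l => l ++ [p.2])) d := by
  induction records generalizing d with
  | nil => rfl
  | cons r rest ih =>
    simp only [List.foldl_cons, List.map_cons, List.filter_cons]
    by_cases h : pvPepAcc ((PySem.Str.split? r.1 "|").getD []) = ""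
    · simpa [h] using ih d
    · simpa [h] using ih (d.modify (pvPepAcc ((PySem.Str.split? r.1 "|").getD [])) [] (fun l => l ++ [r.2]))

-- ===== VERDICT (by name: the statement is the Claim_ definition above) =====
theorem parse_peptidase_accessions_spec : Claim_equal_parse_peptidase_accessions := by
  intro records _
  unfold Spec_parse_peptidase_accessions parse_peptidase_accessions parse_peptidase_accessions_alt
  rw [pv_foldA_eq_foldPairs]
  set ps := ((records.map (fun r => (pvPepAcc ((PySem.Str.split? r.1 "|").getD []), r.2))).filter
      (fun p => !(p.1 == ""))) with hps
  have hnd : ((ps.foldl (fun (d : PySem.Dict String (List String)) p =>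
      d.modify p.1 [] (fun l => l ++ [p.2])) PySem.Dict.empty)).keys.Nodup := by
    exact PySem.Dict.nodup_keys_foldl_modify_key ps Prod.fst [] (fun d p => fun l => l ++ [p.2])
      PySem.Dict.empty (by simp [PySem.Dict.keys_empty])
  rw [PySem.Dict.items_eq_map_keys _ hnd []]
  rw [PySem.Dict.keys_foldl_modify_key]
  simp only [PySem.Dict.keys_empty, PySem.Set.update_nil_left, PySem.List.dedup_eq_ofList]
  apply List.map_congr_left
  intro a _
  rw [PySem.Dict.getD_foldl_modify_append]
  simp [PySem.Dict.getD_empty, hps, List.filter_filter]
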